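-- pv_equiv track=rewrite | github.com/Pev40/seguridad-lab | amsco/amsco.py | descifrar_amsco
-- ===== SOURCE A (Python) =====
-- import math
--
-- def ordenar_clave(clave):
--     clave = clave.upper()
--     letras = list(clave)
--     orden = sorted(list(set(letras)))
--     asignaciones = {}
--     contador = 1
--     for letra in orden:
--         asignaciones[letra] = contador
--         contador += 1
--
--     orden_columnas = []
--     for letra in letras:
--         orden_columnas.append(asignaciones[letra])
--
--     return orden_columnas
--
-- def descifrar_amsco(texto_cifrado, clave):
--     texto_cifrado = ''.join([char.upper() for char in texto_cifrado if char.isalnum()])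
--     num_columnas = len(clave)
--     num_filas = math.ceil(len(texto_cifrado) / num_columnas)
--     orden_columnas = ordenar_clave(clave)
--     columnas = list(zip(orden_columnas, range(num_columnas)))
--     columnas_sorted = sorted(columnas, key=lambda x: x[0])
--     num_letras = len(texto_cifrado)
--     letras_por_columna = num_filas
--     columnas_asignadas = {}
--     indice = 0
--     for _, idx in columnas_sorted:
--         columnas_asignadas[idx] = texto_cifrado[indice:indice + letras_por_columna]
--         indice += letras_por_columna
--     matriz = []
--     for _ in range(num_filas):
--         fila = []
--         for i in range(num_columnas):
--             fila.append(columnas_asignadas[i][0] if len(columnas_asignadas[i]) > 0 else 'X')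
--             columnas_asignadas[i] = columnas_asignadas[i][1:]
--         matriz.append(fila)
--     texto_descifrado = ""
--     for fila in matriz:
--         texto_descifrado += ''.join(fila)
--     texto_descifrado = texto_descifrado.rstrip('X')
--
--     return texto_descifrado
-- ===== SOURCE B (Python) =====
-- import math
--
-- def ordenar_clave(clave):
--     clave = clave.upper()
--     letras = list(clave)
--     orden = sorted(list(set(letras)))
--     asignaciones = {}
--     contador = 1
--     for letra in orden:
--         asignaciones[letra] = contador
--         contador += 1
--     orden_columnas = []
--     for letra in letras:
--         orden_columnas.append(asignaciones[letra])
--     return orden_columnas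
--
-- def descifrar_amsco(texto_cifrado, clave):
--     texto = ''.join([char.upper() for char in texto_cifrado if char.isalnum()])
--     num_columnas = len(clave)
--     num_filas = math.ceil(len(texto) / num_columnas)
--     orden_columnas = ordenar_clave(clave)
--     columnas_sorted = sorted(zip(orden_columnas, range(num_columnas)), key=lambda x: x[0])
--     # position of each original column in the read-out order
--     pos_de_columna = {idx: p for p, (_, idx) in enumerate(columnas_sorted)}
--     # gather each plaintext cell directly from its closed-form ciphertext index
--     salida = []
--     for r in range(num_filas):
--         for col in range(num_columnas):
--             src = pos_de_columna[col] * num_filas + r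
--             salida.append(texto[src] if src < len(texto) else 'X')
--     return ''.join(salida).rstrip('X')
-- ===== Notes on version B (the rewrite author's own statement) =====
-- stated objective: alternative
-- what changed: B computes each plaintext cell directly from its closed-form ciphertext index (column-position * rows + row) instead of slicing per-column segment strings into a dict and repeatedly popping their heads row by row through a mutated matrix.
import Mathlib
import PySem

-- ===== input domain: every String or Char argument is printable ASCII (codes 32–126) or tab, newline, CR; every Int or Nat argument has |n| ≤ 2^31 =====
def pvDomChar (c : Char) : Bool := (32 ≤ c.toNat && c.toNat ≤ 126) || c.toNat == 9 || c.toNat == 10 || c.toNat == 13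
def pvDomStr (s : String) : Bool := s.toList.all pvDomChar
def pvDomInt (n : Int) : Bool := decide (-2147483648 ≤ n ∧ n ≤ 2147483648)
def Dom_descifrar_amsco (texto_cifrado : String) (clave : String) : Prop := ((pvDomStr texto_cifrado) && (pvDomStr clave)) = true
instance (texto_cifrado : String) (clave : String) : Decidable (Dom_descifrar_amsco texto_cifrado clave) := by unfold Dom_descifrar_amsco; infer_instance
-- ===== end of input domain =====

-- B replaces A's segment-dict plus row-by-row matrix popping by a direct closed-form
-- gather (cell (r,col) comes from ciphertext index pos(col)*rows + r); same return value.


-- ===== PORT A =====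
-- helper 'ordenar_clave' (shared by A and by Source B, which reuses it verbatim).
-- sorted(list(set(letras))): the elements are distinct, so the sorted result does not
-- depend on set-iteration order; PySem.Set.ofList gives the distinct elements.
def ordenar_clave (clave : String) : List Int :=
  let letras := (PySem.Str.upper clave).toList
  let orden := PySem.List.sorted (PySem.Set.ofList letras) (fun c => c) false
  let asignaciones : PySem.Dict Char Int :=
    (orden.foldl (fun (st : PySem.Dict Char Int × Int) letra =>
      (st.1.insert letra st.2, st.2 + 1)) (PySem.Dict.empty, 1)).1
  -- asignaciones[letra]: the key is always present (letra ∈ orden), so getD is exact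
  letras.foldl (fun acc letra => acc ++ [asignaciones.getD letra 0]) []

-- port of A; strings handled as List Char; column indices (Python nonneg ints 0..n-1) as Nat.
-- math.ceil(len/n) ported as the exact integer ceiling (L+n-1)/n, equal to the float ceil
-- on Dom-sized inputs; n = 0 (empty clave, Python ZeroDivisionError) is excluded by Pre_.
def descifrar_amsco (texto_cifrado : String) (clave : String) : String :=
  let texto : List Char :=
    (texto_cifrado.toList.filter PySem.Chars.isalnum).map PySem.Chars.upperChar
  let num_columnas : Nat := clave.toList.length
  let num_filas : Nat := (texto.length + num_columnas - 1) / num_columnas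
  let orden_columnas := ordenar_clave clave
  let columnas := orden_columnas.zip (List.range num_columnas)
  let columnas_sorted := PySem.List.sorted columnas (fun x => x.1) false
  let letras_por_columna := num_filas
  let columnas_asignadas : PySem.Dict Nat (List Char) :=
    (columnas_sorted.foldl
      (fun (st : PySem.Dict Nat (List Char) × Nat) p =>
        (st.1.insert p.2 (PySem.List.slice texto (some (st.2 : Int)) (some ((st.2 : Int) + (letras_por_columna : Int)))),
         st.2 + letras_por_columna))
      (PySem.Dict.empty, 0)).1
  let matriz : List (List Char) :=
    ((List.range num_filas).foldl
      (fun (st : List (List Char) × PySem.Dict Nat (List Char)) _ =>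
        let inner := (List.range num_columnas).foldl
          (fun (fd : List Char × PySem.Dict Nat (List Char)) i =>
            let col := fd.2.getD i []   -- columnas_asignadas[i]: key always present
            (fd.1 ++ [if 0 < col.length then col.headD 'X' else 'X'], fd.2.insert i col.tail))
          ([], st.2)
        (st.1 ++ [inner.1], inner.2))
      ([], columnas_asignadas)).1
  let texto_descifrado := matriz.foldl (fun acc fila => acc ++ fila) []
  -- .rstrip('X'): drop trailing 'X' characters (exact, hand-ported)
  String.ofList ((texto_descifrado.reverse.dropWhile (fun c => c = 'X')).reverse)

-- ===== PORT B =====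
def descifrar_amsco_alt (texto_cifrado : String) (clave : String) : String :=
  let texto : List Char :=
    (texto_cifrado.toList.filter PySem.Chars.isalnum).map PySem.Chars.upperChar
  let num_columnas : Nat := clave.toList.length
  let num_filas : Nat := (texto.length + num_columnas - 1) / num_columnas
  let orden_columnas := ordenar_clave clave
  let columnas_sorted := PySem.List.sorted (orden_columnas.zip (List.range num_columnas)) (fun x => x.1) false
  let pos_de_columna : PySem.Dict Nat Nat :=
    (PySem.List.enumerate columnas_sorted).foldl
      (fun (d : PySem.Dict Nat Nat) pe => d.insert pe.2.2 pe.1.toNat) PySem.Dict.empty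
  let salida : List Char :=
    (List.range num_filas).foldl (fun acc r =>
      (List.range num_columnas).foldl (fun acc2 col =>
        let src := (pos_de_columna.getD col 0) * num_filas + r
        acc2 ++ [if src < texto.length then texto.getD src 'X' else 'X']) acc) []
  String.ofList ((salida.reverse.dropWhile (fun c => c = 'X')).reverse)

-- ===== PRECONDITION & SPEC =====
-- Pre_ excludes exactly clave = "", on which Python's A (and B) raise ZeroDivisionError.
def Pre_descifrar_amsco (texto_cifrado : String) (clave : String) : Prop := clave ≠ ""
instance (texto_cifrado : String) (clave : String) : Decidable (Pre_descifrar_amsco texto_cifrado clave) := by unfold Pre_descifrar_amsco; infer_instance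
def pvWitness_descifrar_amsco : String × String := ("OAHLXX1", "BAC")
def Spec_descifrar_amsco (texto_cifrado : String) (clave : String) (out : String) : Prop := out = descifrar_amsco_alt texto_cifrado clave
instance (texto_cifrado : String) (clave : String) (out : String) : Decidable (Spec_descifrar_amsco texto_cifrado clave out) := by unfold Spec_descifrar_amsco; infer_instance

-- ===== CLAIM (what is proved, stated in full; the proofs are below) =====
def Claim_equal_descifrar_amsco : Prop := ∀ (texto_cifrado : String) (clave : String), Dom_descifrar_amsco texto_cifrado clave → Pre_descifrar_amsco texto_cifrado clave → Spec_descifrar_amsco texto_cifrado clave (descifrar_amsco texto_cifrado clave)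

-- ===== LEMMAS AND PROOFS =====

-- the cell A's row loop extracts from a column, as a single getD
theorem pvCellEq (col : List Char) :
    (if 0 < col.length then col.headD 'X' else 'X') = col.getD 0 'X' := by
  cases col <;> simp

-- length of ordenar_clave (it maps each key letter to its rank)
theorem pvLenOrdenar (clave : String) :
    (ordenar_clave clave).length = clave.toList.length := by
  simp only [ordenar_clave]
  rw [PySem.List.foldl_append_singleton_eq_map]
  simp [PySem.Chars.upper]

-- A's segment dict: a key that the fold never inserts keeps its value
theorem pvDictAUnch (texto : List Char) (f : Nat) (l : List (Int × Nat)) :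
    ∀ (d0 : PySem.Dict Nat (List Char)) (ind0 : Nat) (k : Nat), k ∉ l.map Prod.snd →
    ((l.foldl (fun (st : PySem.Dict Nat (List Char) × Nat) p =>
        (st.1.insert p.2 (PySem.List.slice texto (some (st.2 : Int)) (some ((st.2 : Int) + (f : Int)))),
         st.2 + f)) (d0, ind0)).1).getD k [] = d0.getD k [] := by
  induction l with
  | nil => intro d0 ind0 k _; rfl
  | cons a t ih =>
    intro d0 ind0 k hk
    simp only [List.map_cons, List.mem_cons, not_or] at hk
    rw [List.foldl_cons, ih _ _ _ hk.2]
    exact PySem.Dict.getD_insert_of_ne _ _ _ hk.1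

-- A's segment dict: the column at sorted position p holds texto[ind0+p*f : ind0+p*f+f]
theorem pvDictAGetD (texto : List Char) (f : Nat) (l : List (Int × Nat)) :
    ∀ (p : Nat) (hp : p < l.length) (d0 : PySem.Dict Nat (List Char)) (ind0 : Nat),
    (l.map Prod.snd).Nodup →
    ((l.foldl (fun (st : PySem.Dict Nat (List Char) × Nat) q =>
        (st.1.insert q.2 (PySem.List.slice texto (some (st.2 : Int)) (some ((st.2 : Int) + (f : Int)))),
         st.2 + f)) (d0, ind0)).1).getD (l[p].2) []
      = (texto.drop (ind0 + p * f)).take f := by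
  induction l with
  | nil => intro p hp; simp at hp
  | cons a t ih =>
    intro p hp d0 ind0 hnd
    simp only [List.map_cons, List.nodup_cons] at hnd
    rw [List.foldl_cons]
    cases p with
    | zero =>
      simp only [List.getElem_cons_zero]
      rw [pvDictAUnch texto f t _ _ _ hnd.1, PySem.Dict.getD_insert_self,
          PySem.List.slice_natCast_add]
      simp
    | succ q =>
      have hq : q < t.length := by simpa using hp
      simp only [List.getElem_cons_succ]
      rw [ih q hq _ _ hnd.2]
      have harith : ind0 + f + q * f = ind0 + (q + 1) * f := by ring
      rw [harith]

-- B's position dict: a key never inserted keeps its value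
theorem pvDictBUnch (l : List (Int × Nat)) :
    ∀ (d0 : PySem.Dict Nat Nat) (s : Int) (k : Nat), k ∉ l.map Prod.snd →
    ((PySem.List.enumerate l s).foldl
        (fun (d : PySem.Dict Nat Nat) pe => d.insert pe.2.2 pe.1.toNat) d0).getD k 0
      = d0.getD k 0 := by
  induction l with
  | nil => intro d0 s k _; rfl
  | cons a t ih =>
    intro d0 s k hk
    simp only [List.map_cons, List.mem_cons, not_or] at hk
    rw [PySem.List.enumerate_cons, List.foldl_cons, ih _ _ _ hk.2]
    exact PySem.Dict.getD_insert_of_ne _ _ _ hk.1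

-- B's position dict maps the column at sorted position p to p (start offset s)
theorem pvDictBGetD (l : List (Int × Nat)) :
    ∀ (p : Nat) (hp : p < l.length) (d0 : PySem.Dict Nat Nat) (s : Int), 0 ≤ s →
    (l.map Prod.snd).Nodup →
    ((PySem.List.enumerate l s).foldl
        (fun (d : PySem.Dict Nat Nat) pe => d.insert pe.2.2 pe.1.toNat) d0).getD (l[p].2) 0
      = (s + p).toNat := by
  induction l with
  | nil => intro p hp; simp at hp
  | cons a t ih =>
    intro p hp d0 s hs hnd
    simp only [List.map_cons, List.nodup_cons] at hnd
    rw [PySem.List.enumerate_cons, List.foldl_cons]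
    cases p with
    | zero =>
      simp only [List.getElem_cons_zero]
      rw [pvDictBUnch t _ _ _ hnd.1, PySem.Dict.getD_insert_self]
      simp
    | succ q =>
      have hq : q < t.length := by simpa using hp
      simp only [List.getElem_cons_succ]
      rw [ih q hq _ (s + 1) (by omega) hnd.2]
      omega

-- A's inner row loop, dict component: every column below m loses its head
theorem pvRowSnd (m : Nat) (d : PySem.Dict Nat (List Char)) (acc0 : List Char) (i : Nat) :
    (((List.range m).foldl
        (fun (fd : List Char × PySem.Dict Nat (List Char)) j =>
          (fd.1 ++ [if 0 < (fd.2.getD j []).length then (fd.2.getD j []).headD 'X' else 'X'],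
           fd.2.insert j (fd.2.getD j []).tail)) (acc0, d)).2).getD i []
      = if i < m then (d.getD i []).tail else d.getD i [] := by
  induction m with
  | zero => simp
  | succ m ih =>
    simp only [List.range_succ, List.foldl_append, List.foldl_cons, List.foldl_nil]
    by_cases him : i = m
    · subst him
      rw [PySem.Dict.getD_insert_self, ih]
      simp
    · rw [PySem.Dict.getD_insert_of_ne _ _ _ him, ih]
      by_cases h2 : i < m
      · simp [h2, Nat.lt_succ_of_lt h2]
      · have h3 : ¬ i < m + 1 := by omega
        simp [h2, h3]

-- A's inner row loop, row component: cell i is the current head of column i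
theorem pvRowFst (m : Nat) (d : PySem.Dict Nat (List Char)) (acc0 : List Char) :
    (((List.range m).foldl
        (fun (fd : List Char × PySem.Dict Nat (List Char)) j =>
          (fd.1 ++ [if 0 < (fd.2.getD j []).length then (fd.2.getD j []).headD 'X' else 'X'],
           fd.2.insert j (fd.2.getD j []).tail)) (acc0, d)).1)
      = acc0 ++ (List.range m).map (fun i => (d.getD i []).getD 0 'X') := by
  induction m with
  | zero => simp
  | succ m ih =>
    simp only [List.range_succ, List.foldl_append, List.foldl_cons, List.foldl_nil,
      List.map_append, List.map_cons, List.map_nil]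
    rw [pvRowSnd, ih, pvCellEq]
    simp [List.append_assoc]

-- A's matrix loop, dict component: after k rows every column below n has dropped k heads
theorem pvMatSnd (n k : Nat) (d : PySem.Dict Nat (List Char)) (acc0 : List (List Char))
    (i : Nat) (hi : i < n) :
    (((List.range k).foldl
        (fun (st : List (List Char) × PySem.Dict Nat (List Char)) _ =>
          (st.1 ++ [((List.range n).foldl
              (fun (fd : List Char × PySem.Dict Nat (List Char)) j =>
                (fd.1 ++ [if 0 < (fd.2.getD j []).length then (fd.2.getD j []).headD 'X' else 'X'],
                 fd.2.insert j (fd.2.getD j []).tail)) ([], st.2)).1],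
           ((List.range n).foldl
              (fun (fd : List Char × PySem.Dict Nat (List Char)) j =>
                (fd.1 ++ [if 0 < (fd.2.getD j []).length then (fd.2.getD j []).headD 'X' else 'X'],
                 fd.2.insert j (fd.2.getD j []).tail)) ([], st.2)).2)) (acc0, d)).2).getD i []
      = (d.getD i []).drop k := by
  induction k with
  | zero => simp
  | succ k ih =>
    simp only [List.range_succ, List.foldl_append, List.foldl_cons, List.foldl_nil]
    rw [pvRowSnd, ih]
    simp [hi, List.tail_drop]

-- A's matrix loop, rows component: row r reads cell r of every column of the initial dict
theorem pvMatFst (n k : Nat) (d : PySem.Dict Nat (List Char)) (acc0 : List (List Char)) :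
    (((List.range k).foldl
        (fun (st : List (List Char) × PySem.Dict Nat (List Char)) _ =>
          (st.1 ++ [((List.range n).foldl
              (fun (fd : List Char × PySem.Dict Nat (List Char)) j =>
                (fd.1 ++ [if 0 < (fd.2.getD j []).length then (fd.2.getD j []).headD 'X' else 'X'],
                 fd.2.insert j (fd.2.getD j []).tail)) ([], st.2)).1],
           ((List.range n).foldl
              (fun (fd : List Char × PySem.Dict Nat (List Char)) j =>
                (fd.1 ++ [if 0 < (fd.2.getD j []).length then (fd.2.getD j []).headD 'X' else 'X'],
                 fd.2.insert j (fd.2.getD j []).tail)) ([], st.2)).2)) (acc0, d)).1)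
      = acc0 ++ (List.range k).map (fun r =>
          (List.range n).map (fun i => (d.getD i []).getD r 'X')) := by
  induction k with
  | zero => simp
  | succ k ih =>
    simp only [List.range_succ, List.foldl_append, List.foldl_cons, List.foldl_nil,
      List.map_append, List.map_cons, List.map_nil]
    rw [pvRowFst, ih]
    have hrow : (List.range n).map (fun i =>
        ((((List.range k).foldl
          (fun (st : List (List Char) × PySem.Dict Nat (List Char)) _ =>
            (st.1 ++ [((List.range n).foldl
                (fun (fd : List Char × PySem.Dict Nat (List Char)) j =>
                  (fd.1 ++ [if 0 < (fd.2.getD j []).length then (fd.2.getD j []).headD 'X' else 'X'],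
                   fd.2.insert j (fd.2.getD j []).tail)) ([], st.2)).1],
             ((List.range n).foldl
                (fun (fd : List Char × PySem.Dict Nat (List Char)) j =>
                  (fd.1 ++ [if 0 < (fd.2.getD j []).length then (fd.2.getD j []).headD 'X' else 'X'],
                   fd.2.insert j (fd.2.getD j []).tail)) ([], st.2)).2)) (acc0, d)).2).getD i []).getD 0 'X')
        = (List.range n).map (fun i => (d.getD i []).getD k 'X') := by
      apply List.map_congr_left
      intro i hi
      rw [pvMatSnd n k d acc0 i (List.mem_range.mp hi),
          List.getD_eq_getElem?_getD, List.getD_eq_getElem?_getD, List.getElem?_drop]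
      simp
    rw [hrow]
    simp [List.append_assoc]

set_option maxHeartbeats 2000000 in
theorem descifrar_amsco_spec : Claim_equal_descifrar_amsco := by
  intro tc clave _ _
  unfold Spec_descifrar_amsco
  simp only [descifrar_amsco, descifrar_amsco_alt]
  -- shared abbreviations
  set texto : List Char := (tc.toList.filter PySem.Chars.isalnum).map PySem.Chars.upperChar with htexto
  set n : Nat := clave.toList.length with hn
  set fil : Nat := (texto.length + n - 1) / n with hfil
  set perm : List (Int × Nat) :=
    PySem.List.sorted ((ordenar_clave clave).zip (List.range n)) (fun x => x.1) false with hpermdef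
  -- the sorted column list is a permutation of the columns, with distinct original indices
  have hzip : ((ordenar_clave clave).zip (List.range n)).map Prod.snd = List.range n :=
    List.map_snd_zip (by simp [pvLenOrdenar, hn])
  have hpp : (perm.map Prod.snd).Perm (List.range n) := by
    have h1 := (PySem.List.sorted_perm ((ordenar_clave clave).zip (List.range n))
      (fun x => x.1) false).map Prod.snd
    rw [hzip] at h1
    exact h1
  have hnd : (perm.map Prod.snd).Nodup := hpp.nodup_iff.mpr List.nodup_range
  -- peel the shared trailing  rstrip / reverse / ofList wrappers
  apply congrArg
  apply congrArg
  apply congrArg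
  apply congrArg
  -- A: matrix rows flattened; B: nested append loops
  rw [pvMatFst]
  rw [PySem.List.foldl_append_eq_flatMap (fun fila : List Char => fila)]
  simp only [PySem.List.foldl_append_singleton_eq_map, List.nil_append]
  rw [PySem.List.foldl_append_eq_flatMap
    (fun r => (List.range n).map (fun col =>
      if (((PySem.List.enumerate perm 0).foldl
            (fun (d : PySem.Dict Nat Nat) pe => d.insert pe.2.2 pe.1.toNat)
            PySem.Dict.empty).getD col 0) * fil + r < texto.length
      then texto.getD ((((PySem.List.enumerate perm 0).foldl
            (fun (d : PySem.Dict Nat Nat) pe => d.insert pe.2.2 pe.1.toNat)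
            PySem.Dict.empty).getD col 0) * fil + r) 'X'
      else 'X'))]
  simp only [List.nil_append]
  rw [List.flatMap_map]
  apply List.flatMap_congr
  intro r hr
  have hrfil : r < fil := List.mem_range.mp hr
  apply List.map_congr_left
  intro i hi
  have hin : i < n := List.mem_range.mp hi
  -- locate column i in the sorted order
  have hi' : i ∈ perm.map Prod.snd := hpp.mem_iff.mpr (List.mem_range.mpr hin)
  have hplt : List.idxOf i (perm.map Prod.snd) < (perm.map Prod.snd).length :=
    List.idxOf_lt_length_of_mem hi'
  have hplt' : List.idxOf i (perm.map Prod.snd) < perm.length := by simpa using hplt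
  have hsnd : (perm[List.idxOf i (perm.map Prod.snd)]'hplt').2 = i := by
    have hg := List.getElem_idxOf hplt
    rw [List.getElem_map] at hg
    exact hg
  rw [← hsnd]
  rw [pvDictAGetD texto fil perm _ hplt' PySem.Dict.empty 0 hnd,
      pvDictBGetD perm _ hplt' PySem.Dict.empty 0 le_rfl hnd]
  have hp0 : ((0 : Int) + (List.idxOf i (perm.map Prod.snd) : Int)).toNat
      = List.idxOf i (perm.map Prod.snd) := by omega
  rw [hp0, Nat.zero_add]
  rw [List.getD_eq_getElem?_getD, List.getElem?_take, if_pos hrfil, List.getElem?_drop]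
  by_cases hsrc : List.idxOf i (perm.map Prod.snd) * fil + r < texto.length
  · rw [if_pos hsrc, List.getD_eq_getElem?_getD]
  · rw [if_neg hsrc, List.getElem?_eq_none (by omega)]
    rfl
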